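-- pv_equiv track=rewrite | github.com/alynch4047/arabicreader | src/vocabulary_pdf/utils.py | reverse_phrase
-- ===== SOURCE A (Python) =====
-- def reverse_phrase(text):
--     ret = ''
--     words = text.split()
--     for i in range(len(words)):
--         j = len(words) - i - 1 # reverse word order too
--         word = words[j]
--         if ret != '':
--             ret += ' '
--         ret += reverse(word)
--     return ret
--
-- def reverse(text):
--     rev = ''
--     for i in range(len(text)):
--         rev += text[len(text) - i - 1]
--     return rev
-- ===== SOURCE B (Python) =====
-- def reverse_phrase(text):
--     # Reversing the single-space-normalized string reverses both word order
--     # and each word's characters at once.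
--     return ' '.join(text.split())[::-1]
-- ===== Notes on version B (the rewrite author's own statement) =====
-- stated objective: simpler
-- what changed: Replaces the index loop over reversed word positions plus a character-by-character reverse helper with one whitespace-normalizing join followed by a single whole-string slice reversal.
import Mathlib
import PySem

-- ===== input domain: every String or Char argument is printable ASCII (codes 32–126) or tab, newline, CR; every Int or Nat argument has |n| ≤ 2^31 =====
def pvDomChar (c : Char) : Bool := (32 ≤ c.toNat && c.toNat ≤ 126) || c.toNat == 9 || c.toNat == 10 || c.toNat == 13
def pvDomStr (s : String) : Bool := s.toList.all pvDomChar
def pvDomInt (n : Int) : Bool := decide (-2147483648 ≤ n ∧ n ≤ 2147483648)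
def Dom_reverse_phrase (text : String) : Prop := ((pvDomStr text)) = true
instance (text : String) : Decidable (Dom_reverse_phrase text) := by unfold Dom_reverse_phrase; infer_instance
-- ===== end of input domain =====

-- B replaces A's reversed index loop + per-word character-reverse helper by one
-- whitespace-normalizing join followed by a single whole-string reversal (simpler).


-- ===== PORT A =====
-- A's helper 'reverse(text)': rev += text[len(text)-i-1] for i in range(len(text)).
-- The index is always in range; '.map [·] |>.getD []' only makes the lookup total.
def pyReverse (cs : List Char) : List Char :=
  (PySem.List.pyRange 0 (PySem.Chars.len cs) 1).foldl
    (fun rev i =>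
      rev ++ ((PySem.List.pyGet? cs (PySem.Chars.len cs - i - 1)).map (fun c => [c])).getD [])
    []

def reverse_phrase (text : String) : String :=
  let words := PySem.Chars.split₀ text.toList
  String.ofList <|
    (PySem.List.pyRange 0 (words.length : Int) 1).foldl
      (fun ret i =>
        let j : Int := (words.length : Int) - i - 1
        let word := (PySem.List.pyGet? words j).getD []
        (if ret ≠ [] then ret ++ [' '] else ret) ++ pyReverse word)
      []

-- ===== PORT B =====
def reverse_phrase_alt (text : String) : String :=
  let s := PySem.Chars.join [' '] (PySem.Chars.split₀ text.toList)
  String.ofList ((PySem.List.slice? s none none (-1)).getD [])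

-- ===== PRECONDITION & SPEC =====
def Spec_reverse_phrase (text : String) (out : String) : Prop := out = reverse_phrase_alt text
instance (text : String) (out : String) : Decidable (Spec_reverse_phrase text out) := by unfold Spec_reverse_phrase; infer_instance

-- ===== CLAIM (what is proved, stated in full; the proofs are below) =====
def Claim_equal_reverse_phrase : Prop := ∀ (text : String), Dom_reverse_phrase text → Spec_reverse_phrase text (reverse_phrase text)

-- ===== LEMMAS AND PROOFS =====

-- every word produced by text.split() is nonempty
theorem split₀_go_ne_nil (s : List Char) : ∀ (cur : List Char) (acc : List (List Char)),
    (∀ w ∈ acc, w ≠ []) → ∀ w ∈ PySem.Chars.split₀.go s cur acc, w ≠ [] := by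
  induction s with
  | nil =>
      intro cur acc hacc w hw
      simp only [PySem.Chars.split₀.go] at hw
      split at hw
      · exact hacc w (List.mem_reverse.mp hw)
      · rcases List.mem_cons.mp (List.mem_reverse.mp hw) with h | h
        · subst h; simp_all [List.isEmpty_iff]
        · exact hacc w h
  | cons c rest ih =>
      intro cur acc hacc w hw
      simp only [PySem.Chars.split₀.go] at hw
      split at hw
      · split at hw
        · exact ih [] acc hacc w hw
        · refine ih [] (cur.reverse :: acc) ?_ w hw
          intro v hv
          rcases List.mem_cons.mp hv with h | h
          · simp_all [List.isEmpty_iff]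
          · exact hacc v h
      · exact ih (c :: cur) acc hacc w hw

theorem split₀_ne_nil (s : List Char) : ∀ w ∈ PySem.Chars.split₀ s, w ≠ [] := by
  intro w hw
  exact split₀_go_ne_nil s [] [] (by simp) w hw

-- the map 'k ↦ xs[len-k-1]' over range(len) is xs.reverse
theorem rangeRevGet {α : Type} (xs : List α) (d : α) :
    (List.range xs.length).map
      (fun (k : Nat) => (PySem.List.pyGet? xs ((xs.length : Int) - (k : Int) - 1)).getD d)
      = xs.reverse := by
  apply List.ext_getElem
  · simp
  · intro k h1 h2
    simp only [List.getElem_map, List.getElem_range, List.getElem_reverse]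
    have hk : k < xs.length := by simpa using h2
    have : ((xs.length : Int) - k - 1) = ((xs.length - 1 - k : Nat) : Int) := by omega
    rw [this, PySem.List.pyGet?_natCast]
    simp [List.getElem?_eq_getElem (by omega : xs.length - 1 - k < xs.length)]

-- an index loop 'for i in range(len(xs)): f(acc, xs[len-i-1])' folds over xs.reverse
theorem foldl_range_rev {α β : Type} (xs : List α) (d : α) (f : β → α → β) (init : β) :
    (PySem.List.pyRange 0 (xs.length : Int) 1).foldl
      (fun acc i => f acc ((PySem.List.pyGet? xs ((xs.length : Int) - i - 1)).getD d)) init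
      = xs.reverse.foldl f init := by
  rw [PySem.List.pyRange_one]
  simp only [Int.sub_zero, Int.toNat_natCast, List.foldl_map, zero_add]
  conv_rhs => rw [← rangeRevGet xs d, List.foldl_map]

-- A's helper computes List.reverse
theorem pyReverse_eq (cs : List Char) : pyReverse cs = cs.reverse := by
  unfold pyReverse
  have hcong : ∀ (rev : List Char), ∀ i ∈ PySem.List.pyRange 0 (PySem.Chars.len cs) 1,
      rev ++ ((PySem.List.pyGet? cs (PySem.Chars.len cs - i - 1)).map (fun c => [c])).getD []
      = rev ++ [(PySem.List.pyGet? cs ((cs.length : Int) - i - 1)).getD ' '] := by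
    intro rev i hi
    have hi' : 0 ≤ i ∧ i < (cs.length : Int) := by
      simpa [PySem.Chars.len] using (PySem.List.mem_pyRange_one.mp (by simpa [PySem.Chars.len] using hi))
    have hidx : ((cs.length : Int) - i - 1) = ((cs.length - 1 - i.toNat : Nat) : Int) := by omega
    have hlt : cs.length - 1 - i.toNat < cs.length := by omega
    simp [PySem.Chars.len, hidx, PySem.List.pyGet?_natCast,
      List.getElem?_eq_getElem hlt]
  rw [PySem.List.foldl_congr_mem _ _ _ _ hcong]
  simp only [PySem.Chars.len]
  have h2 := foldl_range_rev cs ' ' (fun (rev : List Char) c => rev ++ [c]) []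
  rw [h2, PySem.List.foldl_append_singleton]
  simp

-- join with separator, flatMap form
theorem join_cons_flat (a : List Char) (l : List (List Char)) :
    PySem.Chars.join [' '] (a :: l) = a ++ l.flatMap (fun w => ' ' :: w) := by
  induction l generalizing a with
  | nil => simp [PySem.Chars.join_singleton]
  | cons b l ih => simp [PySem.Chars.join_cons_cons, ih b]

-- A's accumulator loop, once the accumulator is nonempty
theorem foldl_sep_ne (ws : List (List Char)) :
    ∀ (acc : List Char), acc ≠ [] →
      ws.foldl (fun ret w => (if ret ≠ [] then ret ++ [' '] else ret) ++ w.reverse) acc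
        = acc ++ ws.flatMap (fun w => ' ' :: w.reverse) := by
  induction ws with
  | nil => intro acc _; simp
  | cons w rest ih =>
      intro acc hacc
      simp only [List.foldl_cons, if_pos hacc, List.flatMap_cons]
      rw [ih (acc ++ [' '] ++ w.reverse) (by simp)]
      simp

-- A's whole loop is ' '.join of the reversed words in reverse order
theorem joinFold (ws : List (List Char)) (h : ∀ w ∈ ws, w ≠ []) :
    ws.foldl (fun ret w => (if ret ≠ [] then ret ++ [' '] else ret) ++ w.reverse) []
      = PySem.Chars.join [' '] (ws.map List.reverse) := by
  cases ws with
  | nil => simp [PySem.Chars.join_nil]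
  | cons w rest =>
      have hw : w.reverse ≠ [] := by
        simpa using h w (by simp)
      simp only [List.foldl_cons, if_neg (by simp : ¬([] : List Char) ≠ []), List.nil_append]
      rw [foldl_sep_ne rest w.reverse hw, List.map_cons, join_cons_flat, List.flatMap_map]

theorem join_append_singleton (l : List (List Char)) (x : List Char) (h : l ≠ []) :
    PySem.Chars.join [' '] (l ++ [x]) = PySem.Chars.join [' '] l ++ [' '] ++ x := by
  induction l with
  | nil => simp at h
  | cons a l ih =>
      cases l with
      | nil => simp [PySem.Chars.join_cons_cons, PySem.Chars.join_singleton]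
      | cons b l =>
          have h2 := ih (by simp)
          simp only [List.cons_append] at h2 ⊢
          rw [PySem.Chars.join_cons_cons, h2, PySem.Chars.join_cons_cons]
          simp [List.append_assoc]

-- reversing a ' '-join reverses the word order and each word
theorem join_reverse (ws : List (List Char)) :
    (PySem.Chars.join [' '] ws).reverse
      = PySem.Chars.join [' '] ((ws.map List.reverse).reverse) := by
  induction ws with
  | nil => simp [PySem.Chars.join_nil]
  | cons a l ih =>
      cases l with
      | nil => simp [PySem.Chars.join_singleton]
      | cons b l =>
          have hne : ((List.map List.reverse (b :: l)).reverse) ≠ [] := by simp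
          rw [PySem.Chars.join_cons_cons, List.map_cons, List.reverse_cons,
              join_append_singleton _ _ hne, ← ih]
          simp [List.append_assoc]

-- ===== VERDICT (by name: the statement is the Claim_ definition above) =====
theorem reverse_phrase_spec : Claim_equal_reverse_phrase := by
  intro text _
  unfold Spec_reverse_phrase reverse_phrase reverse_phrase_alt
  simp only [PySem.List.slice?_none_none_neg_one, Option.getD_some, pyReverse_eq]
  congr 1
  rw [foldl_range_rev (PySem.Chars.split₀ text.toList) []
        (fun r w => (if r ≠ ([] : List Char) then r ++ [' '] else r) ++ List.reverse w) [],
      joinFold _ (by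
        intro w hw
        exact split₀_ne_nil _ w (List.mem_reverse.mp hw)),
      join_reverse, List.map_reverse]
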